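-- pv_equiv track=rewrite | github.com/1343804976gzla-crypto/true-learning-system | routers/quiz_batch.py | _normalize_fuzzy_option_list
-- ===== SOURCE A (Python) =====
-- from typing import List, Optional, Dict, Any, Tuple
--
-- def _normalize_fuzzy_option_list(raw_options: Any, question_options: Optional[Dict[str, Any]] = None) -> List[str]:
--     allowed = {
--         str(key or "").strip().upper()
--         for key in (question_options or {}).keys()
--         if str(key or "").strip().upper() in {"A", "B", "C", "D", "E"}
--     }
--     if not allowed:
--         allowed = {"A", "B", "C", "D", "E"}
--
--     normalized: List[str] = []
--     for item in raw_options or []: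
--         option = str(item or "").strip().upper()
--         if option and option in allowed and option not in normalized:
--             normalized.append(option)
--
--     return sorted(normalized)
-- ===== SOURCE B (Python) =====
-- def _normalize_fuzzy_option_list(raw_options, question_options=None):
--     letters = ["A", "B", "C", "D", "E"]
--     key_set = {str(k or "").strip().upper() for k in (question_options or {})}
--     allowed = {c for c in letters if c in key_set} or set(letters)
--     raw_set = {str(item or "").strip().upper() for item in (raw_options or [])}
--     return [c for c in letters if c in allowed and c in raw_set]
-- ===== Notes on version B (the rewrite author's own statement) =====
-- stated objective: idiomatic
-- what changed: B inverts the traversal: instead of filtering/deduping raw_options with a growing-list membership check and then sorting, it builds a normalized set of raw_options once and emits the fixed A-E letters in order via set membership, so no dedup branch and no final sort are needed.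
import Mathlib
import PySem

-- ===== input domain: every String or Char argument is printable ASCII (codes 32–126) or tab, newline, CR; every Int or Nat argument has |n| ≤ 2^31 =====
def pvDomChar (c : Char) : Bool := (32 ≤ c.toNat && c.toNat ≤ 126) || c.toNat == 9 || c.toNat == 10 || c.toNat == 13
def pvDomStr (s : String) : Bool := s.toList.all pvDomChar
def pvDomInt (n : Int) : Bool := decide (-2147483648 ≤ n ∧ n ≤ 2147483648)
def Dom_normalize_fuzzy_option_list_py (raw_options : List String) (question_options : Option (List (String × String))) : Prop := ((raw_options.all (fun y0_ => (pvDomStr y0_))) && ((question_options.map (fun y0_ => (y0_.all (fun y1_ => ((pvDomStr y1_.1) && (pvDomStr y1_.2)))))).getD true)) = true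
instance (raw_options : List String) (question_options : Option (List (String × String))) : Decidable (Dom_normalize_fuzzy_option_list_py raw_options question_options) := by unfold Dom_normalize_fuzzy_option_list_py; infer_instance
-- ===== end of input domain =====

-- B emits the fixed A–E letters in order by membership in a normalized set of the input,
-- instead of filtering/deduping the input list with a growing-list check and sorting (objective: idiomatic).

-- str(x or "").strip().upper() for a string x (falsy string = "", so 'x or ""' = x)
def pvNorm (s : String) : String := PySem.Str.upper (PySem.Str.strip s)

-- ===== PORT A =====
def normalize_fuzzy_option_list_py (raw_options : List String) (question_options : Option (List (String × String))) : List String :=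
  let allowed0 : PySem.Set String :=
    PySem.Set.ofList ((((question_options.getD []).map Prod.fst).map pvNorm).filter
      (fun o => o ∈ (["A", "B", "C", "D", "E"] : List String)))
  let allowed : PySem.Set String :=
    if allowed0.isEmpty then PySem.Set.ofList ["A", "B", "C", "D", "E"] else allowed0
  let normalized : List String := raw_options.foldl (fun normalized item =>
    let option := pvNorm item
    if option ≠ "" ∧ PySem.Set.contains allowed option ∧ option ∉ normalized then
      normalized ++ [option]
    else normalized) []
  PySem.List.sorted normalized (fun x => x) false

-- ===== PORT B =====
def normalize_fuzzy_option_list_py_alt (raw_options : List String) (question_options : Option (List (String × String))) : List String :=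
  let letters : List String := ["A", "B", "C", "D", "E"]
  let key_set : PySem.Set String :=
    PySem.Set.ofList (((question_options.getD []).map Prod.fst).map pvNorm)
  let allowed0 : PySem.Set String :=
    PySem.Set.ofList (letters.filter (fun c => PySem.Set.contains key_set c))
  let allowed : PySem.Set String :=
    if allowed0.isEmpty then PySem.Set.ofList letters else allowed0
  let raw_set : PySem.Set String := PySem.Set.ofList (raw_options.map pvNorm)
  letters.filter (fun c => PySem.Set.contains allowed c && PySem.Set.contains raw_set c)

-- ===== PRECONDITION & SPEC =====
def Spec_normalize_fuzzy_option_list_py (raw_options : List String) (question_options : Option (List (String × String))) (out : List String) : Prop := out = normalize_fuzzy_option_list_py_alt raw_options question_options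
instance (raw_options : List String) (question_options : Option (List (String × String))) (out : List String) : Decidable (Spec_normalize_fuzzy_option_list_py raw_options question_options out) := by unfold Spec_normalize_fuzzy_option_list_py; infer_instance

-- ===== CLAIM (what is proved, stated in full; the proofs are below) =====
def Claim_equal_normalize_fuzzy_option_list_py : Prop := ∀ (raw_options : List String) (question_options : Option (List (String × String))), Dom_normalize_fuzzy_option_list_py raw_options question_options → Spec_normalize_fuzzy_option_list_py raw_options question_options (normalize_fuzzy_option_list_py raw_options question_options)

-- ===== LEMMAS AND PROOFS =====

-- membership after A's dedup loop: in the accumulator, or a normalized input value passing the test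
theorem pv_mem_loop (allowed : PySem.Set String) (items : List String) (acc : List String) (c : String) :
    c ∈ items.foldl (fun normalized item =>
        let option := pvNorm item
        if option ≠ "" ∧ PySem.Set.contains allowed option ∧ option ∉ normalized then
          normalized ++ [option]
        else normalized) acc
      ↔ c ∈ acc ∨ (c ≠ "" ∧ PySem.Set.contains allowed c ∧ c ∈ items.map pvNorm) := by
  induction items generalizing acc with
  | nil => simp
  | cons x xs ih =>
    simp only [List.foldl_cons, List.map_cons, List.mem_cons]
    rw [ih]
    constructor
    · rintro (hm | ⟨hne, hal, hmem⟩)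
      · split_ifs at hm with h
        · rcases List.mem_append.1 hm with hm | hm
          · exact Or.inl hm
          · simp only [List.mem_singleton] at hm
            subst hm
            exact Or.inr ⟨h.1, h.2.1, Or.inl rfl⟩
        · exact Or.inl hm
      · exact Or.inr ⟨hne, hal, Or.inr hmem⟩
    · rintro (hm | ⟨hne, hal, (rfl | hmem)⟩)
      · left; split_ifs <;> simp [hm]
      · by_cases h : pvNorm x ≠ "" ∧ PySem.Set.contains allowed (pvNorm x) ∧ pvNorm x ∉ acc
        · left; rw [if_pos h]; simp
        · push Not at h
          left
          split_ifs with h' <;> simp [h hne hal]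
      · exact Or.inr ⟨hne, hal, hmem⟩

theorem pv_nodup_loop (allowed : PySem.Set String) (items : List String) (acc : List String)
    (h : acc.Nodup) :
    (items.foldl (fun normalized item =>
        let option := pvNorm item
        if option ≠ "" ∧ PySem.Set.contains allowed option ∧ option ∉ normalized then
          normalized ++ [option]
        else normalized) acc).Nodup := by
  induction items generalizing acc with
  | nil => exact h
  | cons x xs ih =>
    rw [List.foldl_cons]
    apply ih
    dsimp only
    split_ifs with hc
    · rw [← List.concat_eq_append, List.nodup_concat]
      exact ⟨hc.2.2, h⟩
    · exact h

-- the shared core: A's sort-after-dedup-loop equals B's ordered scan of the letters,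
-- for any pair of allowed sets with the same members, all of which are letters
theorem pv_letters_lt : List.Pairwise (fun a b : String => a < b) (["A", "B", "C", "D", "E"] : List String) := by
  simp only [List.pairwise_cons, List.mem_cons, List.not_mem_nil, String.lt_iff_toList_lt]
  refine ⟨?_, ?_, ?_, ?_, by simp⟩ <;> rintro b (rfl | rfl | rfl | rfl | h) <;> first | decide | cases h

theorem pv_letters_ne (c : String) (hc : c ∈ (["A", "B", "C", "D", "E"] : List String)) : c ≠ "" := by
  simp only [List.mem_cons, List.not_mem_nil, or_false] at hc
  rcases hc with rfl | rfl | rfl | rfl | rfl <;> decide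

theorem pv_main (allowedA allowedB : PySem.Set String) (raw_options : List String)
    (hAB : ∀ c, PySem.Set.contains allowedA c = PySem.Set.contains allowedB c)
    (hsub : ∀ c, PySem.Set.contains allowedA c = true → c ∈ (["A", "B", "C", "D", "E"] : List String)) :
    PySem.List.sorted (raw_options.foldl (fun normalized item =>
        let option := pvNorm item
        if option ≠ "" ∧ PySem.Set.contains allowedA option ∧ option ∉ normalized then
          normalized ++ [option]
        else normalized) []) (fun x => x) false
      = (["A", "B", "C", "D", "E"] : List String).filter
          (fun c => PySem.Set.contains allowedB c
            && PySem.Set.contains (PySem.Set.ofList (raw_options.map pvNorm)) c) := by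
  have hmemN : ∀ c, c ∈ raw_options.foldl (fun normalized item =>
        let option := pvNorm item
        if option ≠ "" ∧ PySem.Set.contains allowedA option ∧ option ∉ normalized then
          normalized ++ [option]
        else normalized) []
      ↔ (c ≠ "" ∧ PySem.Set.contains allowedA c = true ∧ c ∈ raw_options.map pvNorm) := by
    intro c
    rw [pv_mem_loop]
    simp
  have hsorted : PySem.List.sorted (raw_options.foldl (fun normalized item =>
        let option := pvNorm item
        if option ≠ "" ∧ PySem.Set.contains allowedA option ∧ option ∉ normalized then
          normalized ++ [option]
        else normalized) []) (fun x => x) false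
      = (["A", "B", "C", "D", "E"] : List String).filter (fun c => decide (c ≠ "" ∧ PySem.Set.contains allowedA c = true ∧ c ∈ raw_options.map pvNorm)) := by
    apply PySem.List.sorted_eq_of_perm_of_pairwise_lt
    · rw [List.perm_ext_iff_of_nodup (List.Nodup.filter _ (by decide)) (pv_nodup_loop _ _ _ List.nodup_nil)]
      intro c
      simp only [List.mem_filter, decide_eq_true_eq]
      constructor
      · rintro ⟨_, h⟩
        exact (hmemN c).2 h
      · intro h
        exact ⟨hsub c ((hmemN c).1 h).2.1, (hmemN c).1 h⟩
    · exact List.Pairwise.filter _ pv_letters_lt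
  rw [hsorted]
  apply List.filter_congr
  intro c hc
  have hne : c ≠ "" := pv_letters_ne c hc
  rw [Bool.eq_iff_iff]
  simp only [decide_eq_true_eq, Bool.and_eq_true, PySem.Set.contains_iff, PySem.Set.mem_ofList, ← hAB]
  simp [hne]

-- A's and B's allowed sets have the same members, and all of them are letters
theorem pv_allowed_mem (kn : List String) (c : String) :
    c ∈ (if (PySem.Set.ofList (kn.filter (fun o => o ∈ (["A", "B", "C", "D", "E"] : List String)))).isEmpty
           then PySem.Set.ofList ["A", "B", "C", "D", "E"]
           else PySem.Set.ofList (kn.filter (fun o => o ∈ (["A", "B", "C", "D", "E"] : List String))))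
      ↔ c ∈ (["A", "B", "C", "D", "E"] : List String) ∧
          ((∀ k ∈ kn, k ∉ (["A", "B", "C", "D", "E"] : List String)) ∨ c ∈ kn) := by
  split_ifs with h
  · simp only [List.isEmpty_iff, List.eq_nil_iff_forall_not_mem, PySem.Set.mem_ofList,
      List.mem_filter, decide_eq_true_eq, not_and] at h ⊢
    constructor
    · intro hc
      exact ⟨hc, Or.inl fun k hk hkl => h k hk hkl⟩
    · exact fun hc => hc.1
  · simp only [List.isEmpty_iff, List.eq_nil_iff_forall_not_mem, PySem.Set.mem_ofList,
      List.mem_filter, decide_eq_true_eq, not_forall, not_not] at h ⊢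
    obtain ⟨k0, hk0, hk0l⟩ : ∃ k, k ∈ kn ∧ k ∈ (["A", "B", "C", "D", "E"] : List String) := by
      obtain ⟨k0, hk0⟩ := h
      exact ⟨k0, by simpa using hk0⟩
    constructor
    · rintro ⟨h1, h2⟩
      exact ⟨by simpa using h2, Or.inr h1⟩
    · rintro ⟨h1, (h2 | h2)⟩
      · exact absurd hk0l (h2 k0 hk0)
      · exact ⟨h2, by simpa using h1⟩

theorem pv_allowed_mem_b (kn : List String) (c : String) :
    c ∈ (if (PySem.Set.ofList ((["A", "B", "C", "D", "E"] : List String).filter (fun c => PySem.Set.contains (PySem.Set.ofList kn) c))).isEmpty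
           then PySem.Set.ofList (["A", "B", "C", "D", "E"] : List String)
           else PySem.Set.ofList ((["A", "B", "C", "D", "E"] : List String).filter (fun c => PySem.Set.contains (PySem.Set.ofList kn) c)))
      ↔ c ∈ (["A", "B", "C", "D", "E"] : List String) ∧
          ((∀ k ∈ kn, k ∉ (["A", "B", "C", "D", "E"] : List String)) ∨ c ∈ kn) := by
  split_ifs with h
  · rw [List.isEmpty_iff] at h
    have hno : ∀ k ∈ kn, k ∉ (["A", "B", "C", "D", "E"] : List String) := by
      intro k hk hkl
      have hmem : k ∈ PySem.Set.ofList ((["A", "B", "C", "D", "E"] : List String).filter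
          (fun c => PySem.Set.contains (PySem.Set.ofList kn) c)) := by
        simp [PySem.Set.mem_ofList, List.mem_filter, hkl, hk]
      rw [h] at hmem
      cases hmem
    simp only [PySem.Set.mem_ofList]
    exact ⟨fun hc => ⟨hc, Or.inl hno⟩, fun hc => hc.1⟩
  · rw [List.isEmpty_iff] at h
    have hex : ∃ k, k ∈ (["A", "B", "C", "D", "E"] : List String) ∧ k ∈ kn := by
      obtain ⟨x, hx⟩ := List.exists_mem_of_ne_nil _ h
      rw [PySem.Set.mem_ofList, List.mem_filter] at hx
      exact ⟨x, hx.1, by simpa [PySem.Set.contains_iff, PySem.Set.mem_ofList] using hx.2⟩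
    simp only [PySem.Set.mem_ofList, List.mem_filter, PySem.Set.contains_iff, PySem.Set.mem_ofList]
    constructor
    · rintro ⟨h1, h2⟩
      exact ⟨h1, Or.inr h2⟩
    · rintro ⟨h1, (h2 | h2)⟩
      · obtain ⟨k0, hk0l, hk0⟩ := hex
        exact absurd hk0l (h2 k0 hk0)
      · exact ⟨h1, h2⟩

-- ===== VERDICT (by name: the statement is the Claim_ definition above) =====
theorem normalize_fuzzy_option_list_py_spec : Claim_equal_normalize_fuzzy_option_list_py := by
  intro raw_options question_options _
  unfold Spec_normalize_fuzzy_option_list_py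
  unfold normalize_fuzzy_option_list_py normalize_fuzzy_option_list_py_alt
  dsimp only
  apply pv_main
  · intro c
    rw [Bool.eq_iff_iff]
    simp only [PySem.Set.contains_iff]
    rw [pv_allowed_mem, pv_allowed_mem_b]
  · intro c hc
    rw [PySem.Set.contains_iff] at hc
    exact (pv_allowed_mem _ c).1 hc |>.1
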